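-- pv_equiv track=rewrite | github.com/RAVIYADAV6522/cp | CP31/800Rated/Extremely.py | checkRoundNumber
-- ===== SOURCE A (Python) =====
-- def checkRoundNumber(n):
--   countZeros=0
--   countDigits=0
--   while(n>0):
--     if n%10==0:
--       countZeros+=1
--     n=n//10
--     countDigits+=1
--   return countZeros==countDigits-1
-- ===== SOURCE B (Python) =====
-- def checkRoundNumber(n):
--     if n <= 0:
--         return False
--     while n % 10 == 0:
--         n //= 10
--     return n < 10
-- ===== Notes on version B (the rewrite author's own statement) =====
-- stated objective: simpler
-- what changed: B strips trailing zeros and checks that a single digit remains, instead of A's pass over all digits maintaining zero and total counters compared with an off-by-one.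
import Mathlib
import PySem

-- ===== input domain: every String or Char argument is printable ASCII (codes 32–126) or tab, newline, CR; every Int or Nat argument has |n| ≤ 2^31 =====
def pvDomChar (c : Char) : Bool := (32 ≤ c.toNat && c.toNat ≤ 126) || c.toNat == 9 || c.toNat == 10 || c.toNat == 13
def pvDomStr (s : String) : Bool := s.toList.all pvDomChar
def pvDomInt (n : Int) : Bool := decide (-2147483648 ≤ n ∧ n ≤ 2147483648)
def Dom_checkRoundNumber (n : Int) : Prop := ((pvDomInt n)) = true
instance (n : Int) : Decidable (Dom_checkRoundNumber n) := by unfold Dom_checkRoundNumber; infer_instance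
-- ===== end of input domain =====

-- B replaces A's zero/total digit counters (compared with an off-by-one) by stripping
-- trailing zeros and checking that a single digit remains; same return value everywhere.

-- ===== PORT A =====
-- A's while loop over state (n, countZeros, countDigits)
def pvLoopA (n cz cd : Int) : Int × Int :=
  if 0 < n then
    pvLoopA (PySem.Int.floordiv n 10) (if PySem.Int.mod n 10 = 0 then cz + 1 else cz) (cd + 1)
  else (cz, cd)
termination_by n.toNat
decreasing_by
  rw [PySem.Int.floordiv_eq_ediv_of_pos (by omega)]
  omega

def checkRoundNumber (n : Int) : Bool :=
  decide ((pvLoopA n 0 0).1 = (pvLoopA n 0 0).2 - 1)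

-- ===== PORT B =====
-- B's while loop: strip trailing zeros (the '0 < n' conjunct is a totality guard only;
-- B only calls it with 0 < n, and then it is exactly the Python loop)
def pvStrip (n : Int) : Int :=
  if 0 < n ∧ PySem.Int.mod n 10 = 0 then pvStrip (PySem.Int.floordiv n 10) else n
termination_by n.toNat
decreasing_by
  rw [PySem.Int.floordiv_eq_ediv_of_pos (by omega)]
  omega

def checkRoundNumber_alt (n : Int) : Bool :=
  if n ≤ 0 then false else decide (pvStrip n < 10)

-- ===== PRECONDITION & SPEC =====
def Spec_checkRoundNumber (n : Int) (out : Bool) : Prop := out = checkRoundNumber_alt n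
instance (n : Int) (out : Bool) : Decidable (Spec_checkRoundNumber n out) := by unfold Spec_checkRoundNumber; infer_instance

-- ===== CLAIM (what is proved, stated in full; the proofs are below) =====
def Claim_equal_checkRoundNumber : Prop := ∀ (n : Int), Dom_checkRoundNumber n → Spec_checkRoundNumber n (checkRoundNumber n)

-- ===== LEMMAS AND PROOFS =====

theorem pvLoopA_acc : ∀ (k : Nat) (n : Int), n.toNat = k → ∀ cz cd : Int,
    pvLoopA n cz cd = (cz + (pvLoopA n 0 0).1, cd + (pvLoopA n 0 0).2) := by
  intro k
  induction k using Nat.strong_induction_on with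
  | _ k ih =>
    intro n hk cz cd
    rw [pvLoopA]
    conv_rhs => rw [pvLoopA]
    by_cases hn : 0 < n
    · simp only [hn, if_true]
      have hd : PySem.Int.floordiv n 10 = n / 10 := PySem.Int.floordiv_eq_ediv_of_pos (by omega)
      rw [hd]
      have hlt : (n / 10).toNat < k := by omega
      rw [ih _ hlt (n / 10) rfl (if PySem.Int.mod n 10 = 0 then cz + 1 else cz) (cd + 1),
         ih _ hlt (n / 10) rfl (if PySem.Int.mod n 10 = 0 then 0 + 1 else 0) (0 + 1)]
      by_cases hm : PySem.Int.mod n 10 = 0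
      · rw [if_pos hm, if_pos hm]; simp only [Prod.mk.injEq]; constructor <;> ring
      · rw [if_neg hm, if_neg hm]; simp only [Prod.mk.injEq]; constructor <;> ring
    · simp [hn]

theorem pvLoopA_step (n : Int) (hn : 0 < n) :
    pvLoopA n 0 0 = ((if n % 10 = 0 then 1 else 0) + (pvLoopA (n / 10) 0 0).1,
                     1 + (pvLoopA (n / 10) 0 0).2) := by
  rw [pvLoopA, if_pos hn,
      PySem.Int.floordiv_eq_ediv_of_pos (by omega : (0:Int) < 10),
      PySem.Int.mod_eq_emod_of_pos (by omega : (0:Int) < 10),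
      pvLoopA_acc _ (n / 10) rfl]
  by_cases hm : n % 10 = 0 <;> simp [hm]

theorem pvLoopA_neg (n : Int) (hn : ¬ 0 < n) : pvLoopA n 0 0 = (0, 0) := by
  rw [pvLoopA, if_neg hn]

theorem pvStrip_zero (n : Int) (hn : 0 < n) (hm : n % 10 = 0) :
    pvStrip n = pvStrip (n / 10) := by
  rw [pvStrip, if_pos, PySem.Int.floordiv_eq_ediv_of_pos (by omega : (0:Int) < 10)]
  exact ⟨hn, by rw [PySem.Int.mod_eq_emod_of_pos (by omega : (0:Int) < 10)]; exact hm⟩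

theorem pvStrip_stop (n : Int) (hm : n % 10 ≠ 0) : pvStrip n = n := by
  rw [pvStrip, if_neg]
  rintro ⟨-, h⟩
  rw [PySem.Int.mod_eq_emod_of_pos (by omega : (0:Int) < 10)] at h
  exact hm h

theorem pvLoopA_lt : ∀ (k : Nat) (n : Int), n.toNat = k → 0 < n →
    (pvLoopA n 0 0).1 < (pvLoopA n 0 0).2 := by
  intro k
  induction k using Nat.strong_induction_on with
  | _ k ih =>
    intro n hk hn
    rw [pvLoopA_step n hn]
    have hlt : (n / 10).toNat < k := by omega
    by_cases hm : n % 10 = 0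
    · have hn10 : 0 < n / 10 := by omega
      have := ih _ hlt (n / 10) rfl hn10
      simp [hm]; omega
    · by_cases hn10 : 0 < n / 10
      · have := ih _ hlt (n / 10) rfl hn10
        simp [hm]; omega
      · rw [pvLoopA_neg _ hn10]
        simp [hm]

theorem main_eq : ∀ (k : Nat) (n : Int), n.toNat = k →
    checkRoundNumber n = checkRoundNumber_alt n := by
  intro k
  induction k using Nat.strong_induction_on with
  | _ k ih =>
    intro n hk
    by_cases hn : 0 < n
    · have hlt : (n / 10).toNat < k := by omega
      by_cases hm : n % 10 = 0
      · -- last digit zero: both sides reduce to the value at n / 10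
        have hn10 : 0 < n / 10 := by omega
        have hA : checkRoundNumber n = checkRoundNumber (n / 10) := by
          unfold checkRoundNumber
          rw [pvLoopA_step n hn]
          simp [hm]
          constructor <;> intro h <;> omega
        have hB : checkRoundNumber_alt n = checkRoundNumber_alt (n / 10) := by
          unfold checkRoundNumber_alt
          rw [pvStrip_zero n hn hm]
          simp [show ¬ n ≤ 0 by omega, show ¬ n / 10 ≤ 0 by omega]
        rw [hA, hB, ih _ hlt (n / 10) rfl]
      · -- last digit nonzero: strip stops at n, A's check decides n < 10
        have hB : checkRoundNumber_alt n = decide (n < 10) := by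
          unfold checkRoundNumber_alt
          rw [pvStrip_stop n hm, if_neg (by omega)]
        rw [hB]
        unfold checkRoundNumber
        rw [pvLoopA_step n hn]
        by_cases hsmall : n < 10
        · have h0 : n / 10 = 0 := by omega
          rw [h0, pvLoopA_neg 0 (by omega)]
          simp [hm, hsmall]
        · have hn10 : 0 < n / 10 := by omega
          have := pvLoopA_lt _ (n / 10) rfl hn10
          simp [hm, hsmall]
          omega
    · -- n ≤ 0: A's loop never runs (0 = 0 - 1 is false), B returns false
      unfold checkRoundNumber checkRoundNumber_alt
      rw [pvLoopA_neg n hn]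
      simp [show n ≤ 0 by omega]

-- ===== VERDICT (by name: the statement is the Claim_ definition above) =====
theorem checkRoundNumber_spec : Claim_equal_checkRoundNumber := by
  intro n _
  exact main_eq n.toNat n rfl
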